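-- pv_equiv track=rewrite | github.com/marisalieb/tic-tac-toe-twists | earth-wind-and-fire/game.py | check_winner_in_line
-- ===== SOURCE A (Python) =====
-- def check_winner_in_line(line):
--     elements = [spot[0] for spot in line if spot != (' ', ' ')]
--     player_letter = [spot[1] for spot in line if spot != (' ', ' ')]
--     unique_elements = set(elements)
--
--     for element in unique_elements:
--         if elements.count(element) == len(line):
--             x_count = player_letter.count('X')
--             o_count = player_letter.count('O')
--             if x_count > o_count:
--                 return 'X'
--             elif o_count > x_count:
--                 return 'O'
--     return None
-- ===== SOURCE B (Python) =====
-- def check_winner_in_line(line):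
--     if not line:
--         return None
--     key = line[0][0]
--     for s in line:
--         if s == (' ', ' ') or s[0] != key:
--             return None
--     x = sum(1 for s in line if s[1] == 'X')
--     o = sum(1 for s in line if s[1] == 'O')
--     if x > o:
--         return 'X'
--     if o > x:
--         return 'O'
--     return None
-- ===== Notes on version B (the rewrite author's own statement) =====
-- stated objective: simpler
-- what changed: Replaces A's build-a-set-of-first-components and count-each-unique-element loop with one early-exit scan checking every spot is non-empty and shares the first spot's mark, followed by direct X/O counting.
import Mathlib
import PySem

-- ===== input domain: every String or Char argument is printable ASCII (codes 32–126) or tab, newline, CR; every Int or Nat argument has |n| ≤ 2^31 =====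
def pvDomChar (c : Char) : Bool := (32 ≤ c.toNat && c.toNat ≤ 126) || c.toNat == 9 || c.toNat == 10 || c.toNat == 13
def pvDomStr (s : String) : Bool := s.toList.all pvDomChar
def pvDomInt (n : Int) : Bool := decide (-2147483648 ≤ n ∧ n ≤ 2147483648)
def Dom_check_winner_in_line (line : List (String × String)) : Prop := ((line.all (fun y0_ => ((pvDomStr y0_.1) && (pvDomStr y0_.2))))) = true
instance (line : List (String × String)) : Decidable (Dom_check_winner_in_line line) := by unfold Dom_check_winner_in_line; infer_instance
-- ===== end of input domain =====

-- B replaces A's set-build plus count-over-unique-elements loop with a single early-exit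
-- uniformity scan followed by direct X/O counting (objective: simpler).


-- ===== PORT A =====
-- Python's for-loop over the set, with early returns; iteration order is irrelevant
-- to the result (the returned value does not depend on which element matches).
def loopA (elements player_letter : List String) (n : Nat) : List String → Option String
  | [] => none
  | e :: rest =>
    if elements.count e = n then
      let x_count := player_letter.count "X"
      let o_count := player_letter.count "O"
      if x_count > o_count then some "X"
      else if o_count > x_count then some "O"
      else loopA elements player_letter n rest
    else loopA elements player_letter n rest

def check_winner_in_line (line : List (String × String)) : Option String :=
  let elements := (line.filter (fun spot => spot ≠ (" ", " "))).map (fun spot => spot.1)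
  let player_letter := (line.filter (fun spot => spot ≠ (" ", " "))).map (fun spot => spot.2)
  let unique_elements := PySem.Set.ofList elements
  loopA elements player_letter line.length unique_elements

-- ===== PORT B =====
-- B's uniformity for-loop with early return.
def altAllKey (key : String) : List (String × String) → Bool
  | [] => true
  | s :: rest => if s = (" ", " ") ∨ s.1 ≠ key then false else altAllKey key rest

def check_winner_in_line_alt (line : List (String × String)) : Option String :=
  match line with
  | [] => none
  | first :: _ =>
    if altAllKey first.1 line then
      let x := (line.filter (fun s => s.2 = "X")).length
      let o := (line.filter (fun s => s.2 = "O")).length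
      if x > o then some "X"
      else if o > x then some "O"
      else none
    else none

-- ===== PRECONDITION & SPEC =====
def Spec_check_winner_in_line (line : List (String × String)) (out : Option String) : Prop := out = check_winner_in_line_alt line
instance (line : List (String × String)) (out : Option String) : Decidable (Spec_check_winner_in_line line out) := by unfold Spec_check_winner_in_line; infer_instance

-- ===== CLAIM (what is proved, stated in full; the proofs are below) =====
def Claim_equal_check_winner_in_line : Prop := ∀ (line : List (String × String)), Dom_check_winner_in_line line → Spec_check_winner_in_line line (check_winner_in_line line)

-- ===== LEMMAS AND PROOFS =====

-- The loop returns the verdict iff some traversed element occurs n times in `elements`.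
theorem loopA_eq (elements player_letter : List String) (n : Nat) (l : List String) :
    loopA elements player_letter n l =
      (if ∃ e ∈ l, elements.count e = n then
        (if player_letter.count "X" > player_letter.count "O" then some "X"
         else if player_letter.count "O" > player_letter.count "X" then some "O"
         else none)
       else none) := by
  induction l with
  | nil => simp [loopA]
  | cons e rest ih =>
    by_cases h : elements.count e = n
    · have hex : (∃ a ∈ e :: rest, elements.count a = n) := ⟨e, List.mem_cons_self, h⟩
      by_cases hx : player_letter.count "X" > player_letter.count "O"
      · simp [loopA, h, hx]
      · by_cases ho : player_letter.count "O" > player_letter.count "X"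
        · simp [loopA, h, hx, ho]
        · simp [loopA, h, hx, ho, ih]
    · have hiff : (∃ a ∈ e :: rest, elements.count a = n) ↔ (∃ a ∈ rest, elements.count a = n) := by
        constructor
        · rintro ⟨a, ha, hc⟩
          rcases List.mem_cons.mp ha with rfl | ha'
          · exact absurd hc h
          · exact ⟨a, ha', hc⟩
        · rintro ⟨a, ha, hc⟩
          exact ⟨a, List.mem_cons_of_mem _ ha, hc⟩
      simp only [loopA, if_neg h, ih, hiff]

theorem altAllKey_iff (key : String) (l : List (String × String)) :
    altAllKey key l = true ↔ ∀ s ∈ l, s ≠ (" ", " ") ∧ s.1 = key := by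
  induction l with
  | nil => simp [altAllKey]
  | cons s rest ih =>
    simp only [altAllKey]
    split_ifs with h
    · simp only [false_iff]
      intro hall
      rcases h with h | h
      · exact (hall s (by simp)).1 h
      · exact h (hall s (by simp)).2
    · push Not at h
      simp [ih, h.1, h.2]

-- When every spot isnon-empty, the filtered list is the whole line.
theorem filter_all (line : List (String × String))
    (h : ∀ s ∈ line, s ≠ (" ", " ")) :
    line.filter (fun spot => spot ≠ (" ", " ")) = line := by
  rw [List.filter_eq_self]
  intro a ha; simpa using h a ha

theorem count_map_snd (line : List (String × String)) (v : String) :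
    (line.map (fun spot => spot.2)).count v = (line.filter (fun s => s.2 = v)).length := by
  induction line with
  | nil => simp
  | cons s rest ih =>
    by_cases h : s.2 = v <;> simp [h, ih]

theorem check_winner_main (line : List (String × String)) :
    check_winner_in_line line = check_winner_in_line_alt line := by
  match line with
  | [] => rfl
  | first :: rest =>
    simp only [check_winner_in_line, check_winner_in_line_alt, loopA_eq]
    by_cases hall : altAllKey first.1 (first :: rest) = true
    · rw [if_pos hall]
      rw [altAllKey_iff] at hall
      have hne : ∀ s ∈ first :: rest, s ≠ (" ", " ") := fun s hs => (hall s hs).1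
      rw [filter_all _ hne]
      have hex : ∃ e ∈ PySem.Set.ofList ((first :: rest).map (fun spot => spot.1)),
          ((first :: rest).map (fun spot => spot.1)).count e = (first :: rest).length := by
        refine ⟨first.1, ?_, ?_⟩
        · rw [PySem.Set.mem_ofList]; simp
        · rw [List.count_eq_length.mpr, List.length_map]
          intro b hb
          simp only [List.mem_map] at hb
          obtain ⟨s, hs, hb⟩ := hb
          rw [← hb, (hall s hs).2]
      rw [if_pos hex, count_map_snd, count_map_snd]
    · rw [if_neg hall]
      rw [if_neg]
      rintro ⟨e, he, hcnt⟩
      apply hall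
      rw [altAllKey_iff]
      -- from the count: every entry of elements equals e and elements is as long as line,
      -- hence no spot was filtered out and every first component is e; then e = first.1.
      set elements := ((first :: rest).filter (fun spot => spot ≠ (" ", " "))).map (fun spot => spot.1) with helems
      have hlen : elements.length ≤ (first :: rest).length := by
        rw [helems, List.length_map]; exact List.length_filter_le _ _
      have hcle : elements.count e ≤ elements.length := List.count_le_length
      have heq : elements.length = (first :: rest).length := le_antisymm hlen (by omega)
      have hflen : ((first :: rest).filter (fun spot => spot ≠ (" ", " "))).length = (first :: rest).length := by
        have h' := heq
        rwa [helems, List.length_map] at h'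
      have hfilter : (first :: rest).filter (fun spot => spot ≠ (" ", " ")) = first :: rest :=
        (List.filter_sublist).eq_of_length hflen
      have hallc : ∀ b ∈ elements, e = b := List.count_eq_length.mp (by omega)
      have hfirst : ∀ s ∈ first :: rest, s.1 = e := by
        intro s hs
        have : s.1 ∈ elements := by
          rw [helems, hfilter]; exact List.mem_map_of_mem hs
        exact (hallc _ this).symm
      have hne : ∀ s ∈ first :: rest, s ≠ (" ", " ") := by
        intro s hs
        have : s ∈ (first :: rest).filter (fun spot => spot ≠ (" ", " ")) := by
          rw [hfilter]; exact hs
        simpa using (List.of_mem_filter this)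
      intro s hs
      exact ⟨hne s hs, by rw [hfirst s hs, ← hfirst first (by simp)]⟩

-- ===== VERDICT (by name: the statement is the Claim_ definition above) =====
theorem check_winner_in_line_spec : Claim_equal_check_winner_in_line := by
  intro line _
  unfold Spec_check_winner_in_line
  exact check_winner_main line
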